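-- pv_equiv track=rewrite | github.com/stjude-biohackathon/KIDS24-team11 | Transfer_Space/rle_difference.py | compare_rle_as_vectors
-- ===== SOURCE A (Python) =====
-- def decode_rle(rle):
--     decoded = []
--     for value, count in rle:
--         decoded.extend([value] * count)
--     return decoded
--
-- def encode_rle(sequence):
--     if not sequence:
--         return []
--     rle = []
--     current_value = sequence[0]
--     current_count = 1
--     for value in sequence[1:]:
--         if value == current_value:
--             current_count += 1
--         else:
--             rle.append((current_value, current_count))
--             current_value = value
--             current_count = 1
--     rle.append((current_value, current_count))
--     return rle
--
-- def compare_rle_as_vectors(rle1, rle2):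
--     decoded1 = decode_rle(rle1)
--     decoded2 = decode_rle(rle2)
--
--     max_len = max(len(decoded1), len(decoded2))
--     decoded1 += [0] * (max_len - len(decoded1))
--     decoded2 += [0] * (max_len - len(decoded2))
--
--     differences = [a - b for a, b in zip(decoded1, decoded2)]
--     return encode_rle(differences)
-- ===== SOURCE B (Python) =====
-- def compare_rle_as_vectors(rle1, rle2):
--     # Merge the two run lists by boundaries instead of decoding to full vectors.
--     runs1 = [(v, c) for v, c in rle1 if c > 0]
--     runs2 = [(v, c) for v, c in rle2 if c > 0]
--     out = []
--
--     def emit(v, c):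
--         if out and out[-1][0] == v:
--             out[-1] = (v, out[-1][1] + c)
--         else:
--             out.append((v, c))
--
--     i, j = 0, 0
--     while i < len(runs1) and j < len(runs2):
--         v1, c1 = runs1[i]
--         v2, c2 = runs2[j]
--         step = min(c1, c2)
--         emit(v1 - v2, step)
--         if c1 == step:
--             i += 1
--         else:
--             runs1[i] = (v1, c1 - step)
--         if c2 == step:
--             j += 1
--         else:
--             runs2[j] = (v2, c2 - step)
--     while i < len(runs1):
--         emit(*runs1[i])
--         i += 1
--     while j < len(runs2):
--         v2, c2 = runs2[j]
--         emit(-v2, c2)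
--         j += 1
--     return out
-- ===== Notes on version B (the rewrite author's own statement) =====
-- stated objective: faster
-- what changed: Instead of decoding both RLE lists to full vectors, zero-padding, subtracting elementwise and re-encoding, B merges the two run lists directly at run boundaries (two pointers consuming min(c1,c2) at each step) and coalesces equal-valued difference runs on the fly.
import Mathlib
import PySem

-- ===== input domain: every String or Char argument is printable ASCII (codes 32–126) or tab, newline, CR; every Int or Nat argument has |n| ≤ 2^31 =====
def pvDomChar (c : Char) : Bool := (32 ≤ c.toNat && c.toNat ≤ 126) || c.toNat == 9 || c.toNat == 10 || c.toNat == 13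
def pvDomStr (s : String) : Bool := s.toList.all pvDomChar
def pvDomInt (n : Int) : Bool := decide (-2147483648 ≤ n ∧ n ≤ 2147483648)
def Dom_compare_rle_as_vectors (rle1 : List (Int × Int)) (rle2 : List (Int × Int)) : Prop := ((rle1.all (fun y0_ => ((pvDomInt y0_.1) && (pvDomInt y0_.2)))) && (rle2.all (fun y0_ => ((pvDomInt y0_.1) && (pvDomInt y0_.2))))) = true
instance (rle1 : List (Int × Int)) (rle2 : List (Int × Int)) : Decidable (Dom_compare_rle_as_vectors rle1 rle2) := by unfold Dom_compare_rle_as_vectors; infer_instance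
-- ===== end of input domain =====

-- B replaces A's decode-pad-subtract-reencode (O(total decoded length)) by a
-- boundary merge of the two run lists with on-the-fly coalescing (O(#runs)).

-- ===== PORT A =====
-- [value] * count in Python yields [] for count ≤ 0: replicate count.toNat is exact.
def decode_rle (rle : List (Int × Int)) : List Int :=
  rle.foldl (fun acc p => acc ++ List.replicate p.2.toNat p.1) []

-- the for-loop of encode_rle with state (rle, current_value, current_count)
def encLoop : List Int → List (Int × Int) → Int → Int → List (Int × Int)
  | [], rle, cv, cc => rle ++ [(cv, cc)]
  | x :: xs, rle, cv, cc =>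
    if x = cv then encLoop xs rle cv (cc + 1)
    else encLoop xs (rle ++ [(cv, cc)]) x 1

def encode_rle : List Int → List (Int × Int)
  | [] => []
  | h :: t => encLoop t [] h 1

def compare_rle_as_vectors (rle1 : List (Int × Int)) (rle2 : List (Int × Int)) : List (Int × Int) :=
  let decoded1 := decode_rle rle1
  let decoded2 := decode_rle rle2
  let maxLen := max decoded1.length decoded2.length
  let d1 := decoded1 ++ List.replicate (maxLen - decoded1.length) 0
  let d2 := decoded2 ++ List.replicate (maxLen - decoded2.length) 0
  encode_rle (List.zipWith (fun a b => a - b) d1 d2)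

-- ===== PORT B =====
-- the two-pointer while loop over the positive-count run lists (each step
-- consumes min(c1,c2) from the current runs), then the two drain loops
def pvMerge : List (Int × Int) → List (Int × Int) → List (Int × Int)
  | [], [] => []
  | [], (v2, c2) :: t2 => (-v2, c2) :: pvMerge [] t2
  | (v1, c1) :: t1, [] => (v1, c1) :: pvMerge t1 []
  | (v1, c1) :: t1, (v2, c2) :: t2 =>
    if c1 < c2 then (v1 - v2, c1) :: pvMerge t1 ((v2, c2 - c1) :: t2)
    else if c2 < c1 then (v1 - v2, c2) :: pvMerge ((v1, c1 - c2) :: t1) t2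
    else (v1 - v2, c1) :: pvMerge t1 t2
termination_by l1 l2 => l1.length + l2.length
decreasing_by all_goals simp only [List.length_cons]; omega

-- B's emit: coalesce with the last emitted run; out is kept reversed, so the
-- Python "out[-1]" is the head of the accumulator
def pvEmit (acc : List (Int × Int)) (p : Int × Int) : List (Int × Int) :=
  match acc with
  | (v, c) :: r => if v = p.1 then (p.1, c + p.2) :: r else p :: (v, c) :: r
  | [] => [p]

def compare_rle_as_vectors_alt (rle1 : List (Int × Int)) (rle2 : List (Int × Int)) : List (Int × Int) :=
  let runs1 := rle1.filter (fun p => 0 < p.2)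
  let runs2 := rle2.filter (fun p => 0 < p.2)
  ((pvMerge runs1 runs2).foldl pvEmit []).reverse

-- ===== PRECONDITION & SPEC =====
def Spec_compare_rle_as_vectors (rle1 : List (Int × Int)) (rle2 : List (Int × Int)) (out : List (Int × Int)) : Prop := out = compare_rle_as_vectors_alt rle1 rle2
instance (rle1 : List (Int × Int)) (rle2 : List (Int × Int)) (out : List (Int × Int)) : Decidable (Spec_compare_rle_as_vectors rle1 rle2 out) := by unfold Spec_compare_rle_as_vectors; infer_instance

-- ===== CLAIM (what is proved, stated in full; the proofs are below) =====
def Claim_equal_compare_rle_as_vectors : Prop := ∀ (rle1 : List (Int × Int)) (rle2 : List (Int × Int)), Dom_compare_rle_as_vectors rle1 rle2 → Spec_compare_rle_as_vectors rle1 rle2 (compare_rle_as_vectors rle1 rle2)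

-- ===== LEMMAS AND PROOFS =====

-- decode of a run list, recursively (proof-side mirror of decode_rle)
def decCh : List (Int × Int) → List Int
  | [] => []
  | (v, c) :: t => List.replicate c.toNat v ++ decCh t

-- prepend a run onto a run list, merging with its head if the value matches
def hcons (v c : Int) : List (Int × Int) → List (Int × Int)
  | (v', c') :: r => if v' = v then (v, c + c') :: r else (v, c) :: (v', c') :: r
  | [] => [(v, c)]

-- back-to-front coalescing of a chunk list
def coR : List (Int × Int) → List (Int × Int)
  | [] => []
  | (v, c) :: t => hcons v c (coR t)

-- back-to-front run-length encoding
def encodeR : List Int → List (Int × Int)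
  | [] => []
  | x :: xs => hcons x 1 (encodeR xs)

-- zero-padded pointwise difference
def diffSeq : List Int → List Int → List Int
  | [], [] => []
  | [], b :: bs => (-b) :: diffSeq [] bs
  | a :: as, [] => a :: diffSeq as []
  | a :: as, b :: bs => (a - b) :: diffSeq as bs

def allPos (l : List (Int × Int)) : Prop := ∀ p ∈ l, 0 < p.2

theorem hcons_hcons (v a b : Int) (l : List (Int × Int)) :
    hcons v a (hcons v b l) = hcons v (a + b) l := by
  match l with
  | [] => simp [hcons]
  | (v', c') :: r =>
    by_cases h : v' = v
    · simp [hcons, h, add_assoc]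
    · simp [hcons, h]

theorem hcons_of_ne (v c x d : Int) (l : List (Int × Int)) (h : x ≠ v) :
    hcons v c (hcons x d l) = (v, c) :: hcons x d l := by
  match l with
  | [] => simp [hcons, h]
  | (v', c') :: r =>
    by_cases h' : v' = x
    · simp [hcons, h', h]
    · simp [hcons, h', h]

theorem encLoop_eq (xs : List Int) : ∀ (rle : List (Int × Int)) (cv cc : Int),
    encLoop xs rle cv cc = rle ++ hcons cv cc (encodeR xs) := by
  induction xs with
  | nil => intro rle cv cc; simp [encLoop, hcons, encodeR]
  | cons x xs ih =>
    intro rle cv cc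
    by_cases h : x = cv
    · subst h
      simp [encLoop, encodeR, ih, hcons_hcons]
    · simp [encLoop, h, encodeR, ih, hcons_of_ne cv cc x 1 _ h]

theorem encode_eq_encodeR (s : List Int) : encode_rle s = encodeR s := by
  cases s with
  | nil => rfl
  | cons h t => simp [encode_rle, encLoop_eq, encodeR]

theorem foldl_pvEmit (chunks : List (Int × Int)) :
    ∀ (v c : Int) (r : List (Int × Int)),
    List.foldl pvEmit ((v, c) :: r) chunks = (hcons v c (coR chunks)).reverse ++ r := by
  induction chunks with
  | nil => intro v c r; simp [coR, hcons]
  | cons p rest ih =>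
    intro v c r
    obtain ⟨w, d⟩ := p
    by_cases h : v = w
    · subst h
      simp [List.foldl_cons, pvEmit, coR, ih, hcons_hcons]
    · have h' : w ≠ v := fun hh => h hh.symm
      simp only [List.foldl_cons, pvEmit, if_neg h, coR, ih,
        hcons_of_ne v c w d _ h', List.reverse_cons, List.append_assoc,
        List.singleton_append]

theorem alt_eq_coR (rle1 rle2 : List (Int × Int)) :
    compare_rle_as_vectors_alt rle1 rle2 =
      coR (pvMerge (rle1.filter (fun p => 0 < p.2)) (rle2.filter (fun p => 0 < p.2))) := by
  show (List.foldl pvEmit [] (pvMerge (rle1.filter (fun p => 0 < p.2)) (rle2.filter (fun p => 0 < p.2)))).reverse = _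
  cases h : pvMerge (rle1.filter (fun p => 0 < p.2)) (rle2.filter (fun p => 0 < p.2)) with
  | nil => simp [coR]

  | cons p rest =>
    obtain ⟨v, c⟩ := p
    rw [List.foldl_cons]
    show (List.foldl pvEmit ((v, c) :: []) rest).reverse = _
    rw [foldl_pvEmit]
    simp [coR]

theorem encodeR_replicate (n : Nat) (v : Int) (s : List Int) (hn : n ≠ 0) :
    encodeR (List.replicate n v ++ s) = hcons v (n : Int) (encodeR s) := by
  induction n with
  | zero => exact absurd rfl hn
  | succ m ih =>
    by_cases hm : m = 0
    · subst hm; simp [encodeR]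
    · have : encodeR (List.replicate (m + 1) v ++ s)
          = hcons v 1 (encodeR (List.replicate m v ++ s)) := by
        simp [List.replicate_succ, encodeR]
      rw [this, ih hm, hcons_hcons]
      norm_num
      congr 1
      omega

theorem coR_eq_encodeR (chunks : List (Int × Int)) (h : allPos chunks) :
    coR chunks = encodeR (decCh chunks) := by
  induction chunks with
  | nil => rfl
  | cons p t ih =>
    obtain ⟨v, c⟩ := p
    have hc : 0 < c := h (v, c) (List.mem_cons_self ..)
    have ht : allPos t := fun q hq => h q (List.mem_cons_of_mem _ hq)
    have hn : c.toNat ≠ 0 := by omega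
    rw [coR, decCh, encodeR_replicate c.toNat v _ hn, ih ht]
    congr 1
    omega

theorem diffSeq_nil_right (a : List Int) : diffSeq a [] = a := by
  induction a with
  | nil => simp [diffSeq]
  | cons x xs ih => simp [diffSeq, ih]

theorem diffSeq_nil_left (b : List Int) : diffSeq [] b = b.map (fun x => -x) := by
  induction b with
  | nil => simp [diffSeq]
  | cons y ys ih => simp [diffSeq, ih]

theorem diffSeq_replicate (n : Nat) (a b : Int) :
    ∀ (as bs : List Int),
    diffSeq (List.replicate n a ++ as) (List.replicate n b ++ bs)
      = List.replicate n (a - b) ++ diffSeq as bs := by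
  induction n with
  | zero => intro as bs; simp
  | succ m ih => intro as bs; simp [List.replicate_succ, diffSeq, ih]

theorem merge_allPos (l1 l2 : List (Int × Int)) (h1 : allPos l1) (h2 : allPos l2) :
    allPos (pvMerge l1 l2) := by
  induction l1, l2 using pvMerge.induct with
  | case1 => intro p hp; simp [pvMerge] at hp
  | case2 v2 c2 t2 ih =>
    intro p hp
    rw [pvMerge] at hp
    rcases List.mem_cons.mp hp with h | h
    · subst h; exact h2 (v2, c2) (List.mem_cons_self ..)
    · exact ih h1 (fun q hq => h2 q (List.mem_cons_of_mem _ hq)) p h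
  | case3 v1 c1 t1 ih =>
    intro p hp
    rw [pvMerge] at hp
    rcases List.mem_cons.mp hp with h | h
    · subst h; exact h1 (v1, c1) (List.mem_cons_self ..)
    · exact ih (fun q hq => h1 q (List.mem_cons_of_mem _ hq)) h2 p h
  | case4 v1 c1 t1 v2 c2 t2 hlt ih =>
    have hc1 : 0 < c1 := h1 (v1, c1) (List.mem_cons_self ..)
    have hc2 : 0 < c2 := h2 (v2, c2) (List.mem_cons_self ..)
    intro p hp
    rw [pvMerge, if_pos hlt] at hp
    rcases List.mem_cons.mp hp with h | h
    · subst h; exact hc1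
    · refine ih (fun q hq => h1 q (List.mem_cons_of_mem _ hq)) ?_ p h
      intro q hq
      rcases List.mem_cons.mp hq with h' | h'
      · subst h'; simp; omega
      · exact h2 q (List.mem_cons_of_mem _ h')
  | case5 v1 c1 t1 v2 c2 t2 hlt hgt ih =>
    have hc1 : 0 < c1 := h1 (v1, c1) (List.mem_cons_self ..)
    have hc2 : 0 < c2 := h2 (v2, c2) (List.mem_cons_self ..)
    intro p hp
    rw [pvMerge, if_neg hlt, if_pos hgt] at hp
    rcases List.mem_cons.mp hp with h | h
    · subst h; exact hc2
    · refine ih ?_ (fun q hq => h2 q (List.mem_cons_of_mem _ hq)) p h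
      intro q hq
      rcases List.mem_cons.mp hq with h' | h'
      · subst h'; simp; omega
      · exact h1 q (List.mem_cons_of_mem _ h')
  | case6 v1 c1 t1 v2 c2 t2 hlt hgt ih =>
    have hc1 : 0 < c1 := h1 (v1, c1) (List.mem_cons_self ..)
    intro p hp
    rw [pvMerge, if_neg hlt, if_neg hgt] at hp
    rcases List.mem_cons.mp hp with h | h
    · subst h; exact hc1
    · exact ih (fun q hq => h1 q (List.mem_cons_of_mem _ hq))
        (fun q hq => h2 q (List.mem_cons_of_mem _ hq)) p h

theorem merge_decode (l1 l2 : List (Int × Int)) (h1 : allPos l1) (h2 : allPos l2) :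
    decCh (pvMerge l1 l2) = diffSeq (decCh l1) (decCh l2) := by
  induction l1, l2 using pvMerge.induct with
  | case1 => rw [pvMerge]; simp [decCh, diffSeq]
  | case2 v2 c2 t2 ih =>
    rw [pvMerge, decCh, decCh,
      ih h1 (fun q hq => h2 q (List.mem_cons_of_mem _ hq))]
    simp [diffSeq_nil_left, decCh]
  | case3 v1 c1 t1 ih =>
    rw [pvMerge, decCh, decCh,
      ih (fun q hq => h1 q (List.mem_cons_of_mem _ hq)) h2]
    simp [diffSeq_nil_right, decCh]
  | case4 v1 c1 t1 v2 c2 t2 hlt ih =>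
    have hc1 : 0 < c1 := h1 (v1, c1) (List.mem_cons_self ..)
    have hc2 : 0 < c2 := h2 (v2, c2) (List.mem_cons_self ..)
    have ht1 : allPos t1 := fun q hq => h1 q (List.mem_cons_of_mem _ hq)
    have ht2 : allPos ((v2, c2 - c1) :: t2) := by
      intro q hq
      rcases List.mem_cons.mp hq with h' | h'
      · subst h'; simp; omega
      · exact h2 q (List.mem_cons_of_mem _ h')
    have hsplit : List.replicate c2.toNat v2
        = List.replicate c1.toNat v2 ++ List.replicate (c2 - c1).toNat v2 := by
      rw [← List.replicate_add]
      congr 1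
      omega
    rw [pvMerge, if_pos hlt, decCh, ih ht1 ht2, decCh, decCh, decCh, hsplit,
      List.append_assoc, diffSeq_replicate]
  | case5 v1 c1 t1 v2 c2 t2 hlt hgt ih =>
    have hc1 : 0 < c1 := h1 (v1, c1) (List.mem_cons_self ..)
    have hc2 : 0 < c2 := h2 (v2, c2) (List.mem_cons_self ..)
    have ht2 : allPos t2 := fun q hq => h2 q (List.mem_cons_of_mem _ hq)
    have ht1 : allPos ((v1, c1 - c2) :: t1) := by
      intro q hq
      rcases List.mem_cons.mp hq with h' | h'
      · subst h'; simp; omega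
      · exact h1 q (List.mem_cons_of_mem _ h')
    have hsplit : List.replicate c1.toNat v1
        = List.replicate c2.toNat v1 ++ List.replicate (c1 - c2).toNat v1 := by
      rw [← List.replicate_add]
      congr 1
      omega
    rw [pvMerge, if_neg hlt, if_pos hgt, decCh, ih ht1 ht2, decCh, decCh, decCh, hsplit,
      List.append_assoc, diffSeq_replicate]
  | case6 v1 c1 t1 v2 c2 t2 hlt hgt ih =>
    have heq : c1 = c2 := by omega
    have ht1 : allPos t1 := fun q hq => h1 q (List.mem_cons_of_mem _ hq)
    have ht2 : allPos t2 := fun q hq => h2 q (List.mem_cons_of_mem _ hq)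
    rw [pvMerge, if_neg hlt, if_neg hgt, decCh, ih ht1 ht2, decCh, decCh, heq,
      diffSeq_replicate]

theorem decode_aux (rle : List (Int × Int)) :
    ∀ acc : List Int,
    rle.foldl (fun acc p => acc ++ List.replicate p.2.toNat p.1) acc
      = acc ++ decCh (rle.filter (fun p => 0 < p.2)) := by
  induction rle with
  | nil => intro acc; simp [decCh]
  | cons p t ih =>
    intro acc
    obtain ⟨v, c⟩ := p
    by_cases h : 0 < c
    · simp [List.foldl_cons, ih, h, decCh, List.append_assoc]
    · have hz : c.toNat = 0 := by omega
      simp [h, ih, hz]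

theorem decode_eq (rle : List (Int × Int)) :
    decode_rle rle = decCh (rle.filter (fun p => 0 < p.2)) := by
  unfold decode_rle
  rw [decode_aux rle []]
  simp

theorem filter_allPos (l : List (Int × Int)) : allPos (l.filter (fun p => 0 < p.2)) := by
  intro p hp
  have := List.of_mem_filter hp
  simpa using this

theorem zipWith_zero_left (b : List Int) :
    List.zipWith (fun a b => a - b) (List.replicate b.length 0) b = diffSeq [] b := by
  induction b with
  | nil => simp [diffSeq]
  | cons y ys ih => simp [List.replicate_succ, diffSeq, ih]

theorem zipWith_zero_right (a : List Int) :
    List.zipWith (fun a b => a - b) a (List.replicate a.length 0) = diffSeq a [] := by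
  induction a with
  | nil => simp [diffSeq]
  | cons x xs ih => simp [List.replicate_succ, diffSeq, ih]

theorem zipWith_pad (a : List Int) : ∀ b : List Int,
    List.zipWith (fun x y => x - y)
      (a ++ List.replicate (max a.length b.length - a.length) 0)
      (b ++ List.replicate (max a.length b.length - b.length) 0)
      = diffSeq a b := by
  induction a with
  | nil =>
    intro b
    simpa using zipWith_zero_left b
  | cons x xs ih =>
    intro b
    cases b with
    | nil => simpa using zipWith_zero_right (x :: xs)
    | cons y ys =>
      have h1 : max (x :: xs).length (y :: ys).length - (x :: xs).length
          = max xs.length ys.length - xs.length := by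
        simp [Nat.succ_max_succ]
      have h2 : max (x :: xs).length (y :: ys).length - (y :: ys).length
          = max xs.length ys.length - ys.length := by
        simp [Nat.succ_max_succ]
      rw [h1, h2]
      simp only [List.cons_append, List.zipWith_cons_cons, diffSeq, ih ys]

-- ===== VERDICT (by name: the statement is the Claim_ definition above) =====
theorem compare_rle_as_vectors_spec : Claim_equal_compare_rle_as_vectors := by
  intro rle1 rle2 _
  unfold Spec_compare_rle_as_vectors
  unfold compare_rle_as_vectors
  rw [alt_eq_coR,
    coR_eq_encodeR _ (merge_allPos _ _ (filter_allPos rle1) (filter_allPos rle2)),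
    merge_decode _ _ (filter_allPos rle1) (filter_allPos rle2),
    ← decode_eq, ← decode_eq, encode_eq_encodeR, zipWith_pad]
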